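-- pv_equiv track=rewrite | github.com/AO-Cyber-Systems/devflow | devflow/domains/manager.py | _is_domain_in_cert
-- ===== SOURCE A (Python) =====
-- def _is_domain_in_cert(domain: str, cert_domains: list[str]) -> bool:
--     """Check if a domain is covered by the certificate.
--
--     Handles wildcard matching (e.g., *.localhost covers foo.localhost).
--     """
--     if domain in cert_domains:
--         return True
--
--     # Check if covered by wildcard
--     if not domain.startswith("*."):
--         for cert_domain in cert_domains:
--             if cert_domain.startswith("*."):
--                 suffix = cert_domain[1:]  # e.g., ".localhost"
--                 if domain.endswith(suffix) and domain.count(".") == 1: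
--                     return True
--
--     return False
-- ===== SOURCE B (Python) =====
-- def _is_domain_in_cert(domain: str, cert_domains: list[str]) -> bool:
--     """Check if a domain is covered by the certificate (wildcards included)."""
--     if domain in cert_domains:
--         return True
--     if domain.startswith("*.") or domain.count(".") != 1:
--         return False
--     # the only wildcard entry that can cover `domain` is '*' + its dot-suffix
--     return "*" + domain[domain.index("."):] in cert_domains
-- ===== Notes on version B (the rewrite author's own statement) =====
-- stated objective: faster
-- what changed: B replaces A's scan of every cert_domain (endswith test per wildcard entry) by computing the single wildcard '*' + domain's dot-suffix that could cover the domain and doing one membership test.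
import Mathlib
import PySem

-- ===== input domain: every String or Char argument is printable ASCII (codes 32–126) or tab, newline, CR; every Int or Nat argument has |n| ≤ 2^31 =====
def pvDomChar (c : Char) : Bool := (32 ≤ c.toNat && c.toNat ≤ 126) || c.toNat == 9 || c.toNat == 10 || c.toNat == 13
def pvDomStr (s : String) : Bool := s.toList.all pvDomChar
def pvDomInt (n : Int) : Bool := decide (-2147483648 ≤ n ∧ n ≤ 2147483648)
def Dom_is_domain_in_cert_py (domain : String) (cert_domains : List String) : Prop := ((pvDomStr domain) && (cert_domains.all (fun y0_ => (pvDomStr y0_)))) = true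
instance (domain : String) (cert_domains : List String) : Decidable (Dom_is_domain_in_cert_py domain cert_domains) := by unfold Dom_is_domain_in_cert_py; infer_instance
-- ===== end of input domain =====

-- B replaces A's scan over all cert_domains (endswith against every wildcard entry) by a single
-- membership test of the one wildcard that could cover the domain; same return value everywhere.
-- Strings are handled as their character lists (exact: String equality is equality of .toList).

-- ===== PORT A =====
-- the 'for cert_domain in cert_domains' loop of A (early return True on a wildcard match)
def pyA_loop (d : List Char) : List (List Char) → Bool
  | [] => false
  | cd :: rest =>
    if PySem.Chars.startswith cd ['*', '.'] then
      -- suffix = cert_domain[1:]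
      let suffix := PySem.List.slice cd (some 1) none
      if PySem.Chars.endswith d suffix && (PySem.Chars.count d ['.'] == 1) then true
      else pyA_loop d rest
    else pyA_loop d rest

def is_domain_in_cert_py (domain : String) (cert_domains : List String) : Bool :=
  if (cert_domains.map String.toList).contains domain.toList then true
  else if !(PySem.Chars.startswith domain.toList ['*', '.']) then
    pyA_loop domain.toList (cert_domains.map String.toList)
  else false

-- ===== PORT B =====
def is_domain_in_cert_py_alt (domain : String) (cert_domains : List String) : Bool :=
  if (cert_domains.map String.toList).contains domain.toList then true
  else if PySem.Chars.startswith domain.toList ['*', '.'] ||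
      !(PySem.Chars.count domain.toList ['.'] == 1) then false
  else
    -- candidate = "*" + domain[domain.index("."):]  (index = find here: the dot exists)
    (cert_domains.map String.toList).contains
      ('*' :: PySem.List.slice domain.toList (some (PySem.Chars.find domain.toList ['.'])) none)

-- ===== PRECONDITION & SPEC =====
def Spec_is_domain_in_cert_py (domain : String) (cert_domains : List String) (out : Bool) : Prop := out = is_domain_in_cert_py_alt domain cert_domains
instance (domain : String) (cert_domains : List String) (out : Bool) : Decidable (Spec_is_domain_in_cert_py domain cert_domains out) := by unfold Spec_is_domain_in_cert_py; infer_instance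

-- ===== CLAIM (what is proved, stated in full; the proofs are below) =====
def Claim_equal_is_domain_in_cert_py : Prop := ∀ (domain : String) (cert_domains : List String), Dom_is_domain_in_cert_py domain cert_domains → Spec_is_domain_in_cert_py domain cert_domains (is_domain_in_cert_py domain cert_domains)

-- ===== LEMMAS AND PROOFS =====

-- PySem.Chars.count with a single-character needle is List.count
lemma count_go_singleton (c : Char) : ∀ (l : List Char) (fuel acc : Nat), l.length ≤ fuel →
    PySem.Chars.count.go [c] fuel l acc = acc + l.count c := by
  intro l
  induction l with
  | nil => intro fuel acc _; cases fuel <;> simp [PySem.Chars.count.go]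
  | cons h t ih =>
    intro fuel acc hle
    cases fuel with
    | zero => simp at hle
    | succ f =>
      have hlt : t.length ≤ f := by simp at hle; omega
      simp only [PySem.Chars.count.go]
      by_cases hc : c = h
      · subst hc
        simp [List.isPrefixOf, ih f (acc + 1) hlt]
        omega
      · simp [List.isPrefixOf, beq_eq_false_iff_ne.mpr hc, ih f acc hlt, List.count_cons,
          beq_eq_false_iff_ne.mpr (Ne.symm hc)]

lemma chars_count_singleton (l : List Char) (c : Char) :
    PySem.Chars.count l [c] = l.count c := by
  have h := count_go_singleton c l l.length 0 le_rfl
  simp [PySem.Chars.count, h]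

-- a singleton prefix is a head
lemma singleton_prefix_iff (c : Char) (l : List Char) : [c] <+: l ↔ ∃ t, l = c :: t := by
  cases l with
  | nil => simp
  | cons h t =>
    constructor
    · intro hp
      rcases (List.cons_prefix_cons.mp hp) with ⟨rfl, -⟩
      exact ⟨t, rfl⟩
    · rintro ⟨t', ht⟩
      cases ht
      exact List.cons_prefix_cons.mpr ⟨rfl, List.nil_prefix⟩

-- splitting at the unique dot is unique
lemma split_unique {p q u r : List Char} (h : p ++ '.' :: q = u ++ '.' :: r)
    (hp : '.' ∉ p) (hu : '.' ∉ u) : p = u ∧ q = r := by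
  induction p generalizing u with
  | nil =>
    cases u with
    | nil => simpa using h
    | cons a u' =>
      simp only [List.nil_append, List.cons_append, List.cons.injEq] at h
      exact absurd (by simp [← h.1]) hu
  | cons a p' ih =>
    cases u with
    | nil =>
      simp only [List.cons_append, List.nil_append, List.cons.injEq] at h
      exact absurd (by simp [h.1]) hp
    | cons b u' =>
      simp only [List.cons_append, List.cons.injEq] at h
      have := ih (u := u') h.2 (by simp at hp; exact hp.2) (by simp at hu; exact hu.2)
      exact ⟨by simp [h.1, this.1], this.2⟩

-- find points at the unique dot
lemma find_of_split (p q : List Char) (hp : '.' ∉ p) :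
    PySem.Chars.find (p ++ '.' :: q) ['.'] = (p.length : Int) := by
  have hinf : ['.'] <:+: (p ++ '.' :: q) := ⟨p, q, by simp⟩
  have hnn : 0 ≤ PySem.Chars.find (p ++ '.' :: q) ['.'] :=
    (PySem.Chars.find_nonneg_iff _ _).mpr hinf
  obtain ⟨hpre, hmin⟩ := PySem.Chars.find_spec hnn
  set n := (PySem.Chars.find (p ++ '.' :: q) ['.']).toNat with hn
  have hple : ¬ (p.length < n) := by
    intro hlt
    exact hmin p.length hlt ((singleton_prefix_iff _ _).mpr ⟨q, by simp⟩)
  have hnlt : ¬ (n < p.length) := by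
    intro hlt
    obtain ⟨t, ht⟩ := (singleton_prefix_iff _ _).mp hpre
    have hdrop : (p ++ '.' :: q).drop n = p.drop n ++ '.' :: q := List.drop_append_of_le_length (le_of_lt hlt)
    rw [hdrop] at ht
    have : p.drop n ≠ [] := by simp [hlt]
    obtain ⟨a, pt, hpt⟩ := List.exists_cons_of_ne_nil this
    rw [hpt] at ht
    simp only [List.cons_append, List.cons.injEq] at ht
    have : a ∈ p := by
      have : a ∈ p.drop n := by simp [hpt]
      exact List.mem_of_mem_drop this
    exact hp (ht.1 ▸ this)
  have : n = p.length := by omega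
  omega

-- the single wildcard entry B tests is exactly what A's per-element test accepts
lemma elem_test_eq (p q cd : List Char) (hp : '.' ∉ p)
    (hcnt : (p ++ '.' :: q).count '.' = 1) :
    (if PySem.Chars.startswith cd ['*', '.'] then
      (PySem.Chars.endswith (p ++ '.' :: q) (PySem.List.slice cd (some 1) none) &&
        (PySem.Chars.count (p ++ '.' :: q) ['.'] == 1))
     else false) = (cd == '*' :: '.' :: q) := by
  by_cases hsw : PySem.Chars.startswith cd ['*', '.'] = true
  · rw [if_pos hsw]
    obtain ⟨r, hr⟩ := (PySem.Chars.startswith_iff _ _).mp hsw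
    have hr' : cd = '*' :: '.' :: r := by rw [← hr]; rfl
    subst hr'
    have hslice : PySem.List.slice ('*' :: '.' :: r) (some 1) none = '.' :: r := by
      rw [PySem.List.slice_from _ (by norm_num)]; rfl
    rw [hslice, chars_count_singleton, hcnt]
    simp only [beq_self_eq_true, Bool.and_true]
    by_cases hend : ('.' :: r) <:+ (p ++ '.' :: q)
    · rw [(PySem.Chars.endswith_iff _ _).mpr hend]
      obtain ⟨u, hu⟩ := hend
      have hr_nodot : '.' ∉ r := by
        have : (p ++ '.' :: q).count '.' = u.count '.' + 1 + r.count '.' := by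
          rw [← hu]; simp [List.count_append]; omega
        have hr0 : r.count '.' = 0 := by omega
        simpa [List.count_eq_zero] using hr0
      have hu_nodot : '.' ∉ u := by
        have : (p ++ '.' :: q).count '.' = u.count '.' + 1 + r.count '.' := by
          rw [← hu]; simp [List.count_append]; omega
        have hu0 : u.count '.' = 0 := by omega
        simpa [List.count_eq_zero] using hu0
      have := split_unique hu.symm hp hu_nodot
      simp [this.2]
    · rw [show PySem.Chars.endswith (p ++ '.' :: q) ('.' :: r) = false by
        cases hE : PySem.Chars.endswith (p ++ '.' :: q) ('.' :: r)
        · rfl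
        · exact absurd ((PySem.Chars.endswith_iff _ _).mp hE) hend]
      have : ('*' :: '.' :: r == '*' :: '.' :: q) = false := by
        cases hbe : ('*' :: '.' :: r == '*' :: '.' :: q)
        · rfl
        · have := eq_of_beq hbe
          simp only [List.cons.injEq] at this
          exact absurd (this.2.2 ▸ (⟨p, by simp⟩ : ('.' :: q) <:+ (p ++ '.' :: q))) hend
      simp [this]
  · rw [if_neg hsw]
    have : (cd == '*' :: '.' :: q) = false := by
      cases hbe : (cd == '*' :: '.' :: q)
      · rfl
      · have := eq_of_beq hbe
        subst this
        exact absurd ((PySem.Chars.startswith_iff _ _).mpr (List.cons_prefix_cons.mpr ⟨rfl, List.cons_prefix_cons.mpr ⟨rfl, List.nil_prefix⟩⟩)) hsw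
    simp [this]

-- A's loop, when the domain has exactly one dot, is a membership test for B's candidate
lemma loop_eq_contains (p q : List Char) (cs : List (List Char)) (hp : '.' ∉ p)
    (hcnt : (p ++ '.' :: q).count '.' = 1) :
    pyA_loop (p ++ '.' :: q) cs = cs.contains ('*' :: '.' :: q) := by
  induction cs with
  | nil => simp [pyA_loop]
  | cons cd rest ih =>
    have h := elem_test_eq p q cd hp hcnt
    simp only [pyA_loop, ih, List.contains_cons]
    rw [Bool.beq_comm (a := ('*' :: '.' :: q : List Char)) (b := cd), ← h]
    cases PySem.Chars.startswith cd ['*', '.'] <;>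
      cases PySem.Chars.endswith (p ++ '.' :: q) (PySem.List.slice cd (some 1) none) &&
        (PySem.Chars.count (p ++ '.' :: q) ['.'] == 1) <;> simp

-- A's loop can never fire when the dot count is not 1
lemma loop_false (d : List Char) (cs : List (List Char))
    (hcnt : (PySem.Chars.count d ['.'] == 1) = false) :
    pyA_loop d cs = false := by
  induction cs with
  | nil => rfl
  | cons cd rest ih =>
    simp only [pyA_loop]
    split_ifs with h1 h2
    · simp [hcnt] at h2
    · exact ih
    · exact ih

-- a list with dot-count 1 splits uniquely around its dot
lemma exists_split (d : List Char) (h : d.count '.' = 1) :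
    ∃ p q, d = p ++ '.' :: q ∧ '.' ∉ p ∧ '.' ∉ q := by
  have hmem : '.' ∈ d := by
    by_contra hm
    rw [List.count_eq_zero.mpr hm] at h
    omega
  obtain ⟨p, q, hd⟩ := List.append_of_mem hmem
  refine ⟨p, q, hd, ?_, ?_⟩
  · have : d.count '.' = p.count '.' + 1 + q.count '.' := by
      rw [hd]; simp [List.count_append]; omega
    rw [h] at this
    exact List.count_eq_zero.mp (by omega)
  · have : d.count '.' = p.count '.' + 1 + q.count '.' := by
      rw [hd]; simp [List.count_append]; omega
    rw [h] at this
    exact List.count_eq_zero.mp (by omega)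

-- ===== VERDICT (by name: the statement is the Claim_ definition above) =====
theorem is_domain_in_cert_py_spec : Claim_equal_is_domain_in_cert_py := by
  intro domain cert_domains _
  show is_domain_in_cert_py domain cert_domains = is_domain_in_cert_py_alt domain cert_domains
  unfold is_domain_in_cert_py is_domain_in_cert_py_alt
  generalize domain.toList = d
  generalize (cert_domains.map String.toList) = cs
  by_cases hmem : cs.contains d = true
  · rw [if_pos hmem, if_pos hmem]
  · rw [if_neg hmem, if_neg hmem]
    by_cases hsw : PySem.Chars.startswith d ['*', '.'] = true
    · rw [if_neg (by simp [hsw]), if_pos (by simp [hsw])]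
    · have hswf : PySem.Chars.startswith d ['*', '.'] = false := by
        cases h : PySem.Chars.startswith d ['*', '.']
        · rfl
        · exact absurd h hsw
      by_cases hcnt : (PySem.Chars.count d ['.'] == 1) = true
      · rw [if_pos (by simp [hswf]), if_neg (by simp [hswf, hcnt])]
        have hc1 : d.count '.' = 1 := by
          rw [chars_count_singleton] at hcnt
          simpa using hcnt
        obtain ⟨p, q, hd, hp, hq⟩ := exists_split d hc1
        subst hd
        rw [loop_eq_contains p q cs hp hc1, find_of_split p q hp,
          PySem.List.slice_from _ (Int.natCast_nonneg _)]
        simp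
      · have hcf : (PySem.Chars.count d ['.'] == 1) = false := by
          cases h : (PySem.Chars.count d ['.'] == 1)
          · rfl
          · exact absurd h hcnt
        rw [if_pos (by simp [hswf]), if_pos (by simp [hcf])]
        exact loop_false d cs hcf
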